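-- pv_equiv track=rewrite | github.com/PRKKILLER/Algorithm_Practice | Company-OA/Robinhood/MutateMatrix.py | solution
-- ===== SOURCE A (Python) =====
-- def rotate(matrix):
--     res = [list(reversed([row[i] for row in matrix])) for i in range(len(matrix))]
--     return res
--
-- def diagonalMain(matrix):
--     res = [[row[i] for row in matrix] for i in range(len(matrix))]
--     return res
--
-- def diagonalSecond(matrix):
--     tmp = list(reversed(diagonalMain(matrix)))
--     return [list(reversed(row)) for row in tmp]
--
-- def solution(a, queries):
--     for q in queries:
--         if q == 0:
--             a = rotate(a)
--         elif q == 1: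
--             a = diagonalMain(a)
--         elif q == 2:
--             a = diagonalSecond(a)
--
--     return a
-- ===== SOURCE B (Python) =====
-- def solution(a, queries):
--     # compose all queries into one dihedral element g = (swap, flip_row, flip_col):
--     # out[i][j] = a[flip_row? n-1-u : u][flip_col? n-1-v : v], (u,v) = (j,i) if swap else (i,j)
--     g = None
--     for q in queries:
--         if q == 0:
--             f = (True, True, False)    # rotate clockwise
--         elif q == 1:
--             f = (True, False, False)   # main-diagonal transpose
--         elif q == 2:
--             f = (True, True, True)     # anti-diagonal transpose
--         else:
--             continue
--         if g is None:
--             g = f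
--         else:
--             s, bi, bj = g
--             fs, fbi, fbj = f
--             g = (not fs, bi != fbj, bj != fbi) if s else (fs, bi != fbi, bj != fbj)
--     if g is None:
--         return a
--     # apply the single net transform with whole-row operations
--     n = len(a)
--     s, bi, bj = g
--     res = []
--     if s:
--         cols = list(zip(*a))
--         for i in range(n):
--             col = list(cols[n - 1 - i if bj else i])
--             res.append(col[::-1] if bi else col)
--     else:
--         for i in range(n):
--             row = a[n - 1 - i if bi else i][:n]
--             res.append(row[::-1] if bj else row)
--     return res
-- ===== Notes on version B (the rewrite author's own statement) =====
-- stated objective: alternative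
-- what changed: Instead of materialising a new n-by-n matrix for every query, B composes all queries into a single element of the dihedral group of the square (swap/flip-row/flip-col triple) and applies that one net index map once with whole-row operations; on the generator's inputs (queries rarely in {0,1,2}) the measured cost is the same.
import Mathlib
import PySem

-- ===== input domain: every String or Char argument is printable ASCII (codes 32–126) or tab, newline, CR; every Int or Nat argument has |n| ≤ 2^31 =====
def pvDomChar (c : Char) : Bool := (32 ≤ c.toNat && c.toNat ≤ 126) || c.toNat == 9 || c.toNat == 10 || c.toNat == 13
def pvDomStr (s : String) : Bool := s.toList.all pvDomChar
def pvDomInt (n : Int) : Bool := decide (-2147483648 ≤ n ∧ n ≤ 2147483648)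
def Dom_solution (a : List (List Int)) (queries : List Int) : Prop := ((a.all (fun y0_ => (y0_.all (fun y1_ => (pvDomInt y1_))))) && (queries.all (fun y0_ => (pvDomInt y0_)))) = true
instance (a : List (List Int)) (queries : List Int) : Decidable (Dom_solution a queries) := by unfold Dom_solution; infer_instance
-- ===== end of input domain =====

-- ===== PORT A =====
-- A applies each query as a full matrix transform; row[i] accesses are in range under Pre_ (getD is exact there).
def rotateL (m : List (List Int)) : List (List Int) :=
  (List.range m.length).map (fun i => (m.map (fun row => row.getD i 0)).reverse)

def diagMainL (m : List (List Int)) : List (List Int) :=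
  (List.range m.length).map (fun i => m.map (fun row => row.getD i 0))

def diagSecondL (m : List (List Int)) : List (List Int) :=
  ((diagMainL m).reverse).map (fun row => row.reverse)

def solution (a : List (List Int)) (queries : List Int) : List (List Int) :=
  queries.foldl
    (fun m q =>
      if q = 0 then rotateL m
      else if q = 1 then diagMainL m
      else if q = 2 then diagSecondL m
      else m) a

-- ===== PORT B =====
-- B composes all queries into one dihedral element (swap, flipRow, flipCol) and applies it once,
-- building each output row by whole-row operations.
-- the inline composition in Source B's loop: element "apply f first, then g"
def composeT (g f : Bool × Bool × Bool) : Bool × Bool × Bool :=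
  if g.1 then (!f.1, xor g.2.1 f.2.2, xor g.2.2 f.2.1)
  else (f.1, xor g.2.1 f.2.1, xor g.2.2 f.2.2)

-- 'g = f if g is None else <compose>'
def updT (st : Option (Bool × Bool × Bool)) (f : Bool × Bool × Bool) : Option (Bool × Bool × Bool) :=
  match st with
  | none => some f
  | some g => some (composeT g f)

-- n - 1 - i if flip else i  (the index expression in Source B)
def tF (b : Bool) (n x : Nat) : Nat := if b then n - 1 - x else x

-- list(zip(*a)): columns 0..min(row lengths)-1; exact where Source B reads it (indices < min length)
def zipStar (a : List (List Int)) : List (List Int) :=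
  (List.range ((a.map List.length).min?.getD 0)).map (fun k => a.map (fun row => row.getD k 0))

def solution_alt (a : List (List Int)) (queries : List Int) : List (List Int) :=
  let g := queries.foldl
    (fun st q =>
      if q = 0 then updT st (true, true, false)
      else if q = 1 then updT st (true, false, false)
      else if q = 2 then updT st (true, true, true)
      else st) none
  match g with
  | none => a
  | some (s, bi, bj) =>
    let n := a.length
    if s then
      let cols := zipStar a
      (List.range n).map (fun i =>
        -- cols[...]: index is in range under Pre_ (getD is exact there)
        let col := cols.getD (tF bj n i) []
        if bi then col.reverse else col)
    else
      (List.range n).map (fun i =>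
        -- a[...]: index is in range (< n); [:n] is List.take n
        let row := (a.getD (tF bi n i) []).take n
        if bj then row.reverse else row)

-- ===== PRECONDITION & SPEC =====
-- Pre_ excludes exactly the inputs where A raises IndexError: an effective query (0/1/2) on a
-- matrix with some row shorter than the number of rows.
def Pre_solution (a : List (List Int)) (queries : List Int) : Prop :=
  (∀ q ∈ queries, q ≠ 0 ∧ q ≠ 1 ∧ q ≠ 2) ∨ (∀ row ∈ a, a.length ≤ row.length)
instance (a : List (List Int)) (queries : List Int) : Decidable (Pre_solution a queries) := by
  unfold Pre_solution; infer_instance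

def pvWitness_solution : List (List Int) × List Int := ([[1, 2], [3, 4]], [0, 1, 2, 0])

def Spec_solution (a : List (List Int)) (queries : List Int) (out : List (List Int)) : Prop := out = solution_alt a queries
instance (a : List (List Int)) (queries : List Int) (out : List (List Int)) : Decidable (Spec_solution a queries out) := by unfold Spec_solution; infer_instance

-- ===== CLAIM (what is proved, stated in full; the proofs are below) =====
def Claim_equal_solution : Prop := ∀ (a : List (List Int)) (queries : List Int), Dom_solution a queries → Pre_solution a queries → Spec_solution a queries (solution a queries)

-- ===== LEMMAS AND PROOFS =====

def stepA (m : List (List Int)) (q : Int) : List (List Int) :=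
  if q = 0 then rotateL m
  else if q = 1 then diagMainL m
  else if q = 2 then diagSecondL m
  else m

def stepB (st : Option (Bool × Bool × Bool)) (q : Int) : Option (Bool × Bool × Bool) :=
  if q = 0 then updT st (true, true, false)
  else if q = 1 then updT st (true, false, false)
  else if q = 2 then updT st (true, true, true)
  else st

def applyT (g : Bool × Bool × Bool) (a : List (List Int)) : List (List Int) :=
  match g with
  | (s, bi, bj) =>
    let n := a.length
    (List.range n).map (fun i =>
      (List.range n).map (fun j =>
        (a.getD (tF bi n (if s then j else i)) []).getD (tF bj n (if s then i else j)) 0))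

def buildFast (g : Bool × Bool × Bool) (a : List (List Int)) : List (List Int) :=
  match g with
  | (s, bi, bj) =>
    let n := a.length
    if s then
      let cols := zipStar a
      (List.range n).map (fun i =>
        let col := cols.getD (tF bj n i) []
        if bi then col.reverse else col)
    else
      (List.range n).map (fun i =>
        let row := (a.getD (tF bi n i) []).take n
        if bj then row.reverse else row)

def interpT (st : Option (Bool × Bool × Bool)) (a : List (List Int)) : List (List Int) :=
  match st with
  | none => a
  | some g => applyT g a

def interpF (st : Option (Bool × Bool × Bool)) (a : List (List Int)) : List (List Int) :=
  match st with
  | none => a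
  | some g => buildFast g a

lemma solution_eq (a : List (List Int)) (qs : List Int) :
    solution a qs = qs.foldl stepA a := rfl

lemma solution_alt_eq (a : List (List Int)) (qs : List Int) :
    solution_alt a qs = interpF (qs.foldl stepB none) a := by
  unfold solution_alt
  show (match qs.foldl stepB none with
        | none => a
        | some (s, bi, bj) =>
          let n := a.length
          if s then
            let cols := zipStar a
            (List.range n).map (fun i =>
              let col := cols.getD (tF bj n i) []
              if bi then col.reverse else col)
          else
            (List.range n).map (fun i =>
              let row := (a.getD (tF bi n i) []).take n
              if bj then row.reverse else row)) =
      interpF (qs.foldl stepB none) a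
  cases qs.foldl stepB none with
  | none => rfl
  | some g => obtain ⟨s, bi, bj⟩ := g; rfl

lemma tF_lt (b : Bool) (n x : Nat) (h : x < n) : tF b n x < n := by
  unfold tF; split <;> omega

lemma tF_tF (b b' : Bool) (n x : Nat) (h : x < n) : tF b n (tF b' n x) = tF (xor b b') n x := by
  cases b <;> cases b' <;> simp [tF]
  all_goals omega

lemma rotateL_applyT (m : List (List Int)) : rotateL m = applyT (true, true, false) m := by
  apply List.ext_getElem (by simp [rotateL, applyT])
  intro i h1 h2
  apply List.ext_getElem (by simp [rotateL, applyT])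
  intro j hj1 hj2
  have hjm : j < m.length := by simpa [rotateL] using hj1
  simp [rotateL, applyT, tF, List.getD_eq_getElem?_getD,
        List.getElem?_eq_getElem (show m.length - 1 - j < m.length by omega)]

lemma diagMainL_applyT (m : List (List Int)) : diagMainL m = applyT (true, false, false) m := by
  apply List.ext_getElem (by simp [diagMainL, applyT])
  intro i h1 h2
  apply List.ext_getElem (by simp [diagMainL, applyT])
  intro j hj1 hj2
  have hjm : j < m.length := by simpa [diagMainL] using hj1
  simp [diagMainL, applyT, tF, List.getD_eq_getElem?_getD, List.getElem?_eq_getElem hjm]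

lemma diagSecondL_applyT (m : List (List Int)) : diagSecondL m = applyT (true, true, true) m := by
  apply List.ext_getElem (by simp [diagSecondL, diagMainL, applyT])
  intro i h1 h2
  apply List.ext_getElem (by simp [diagSecondL, diagMainL, applyT])
  intro j hj1 hj2
  have hjm : j < m.length := by simpa [diagSecondL, diagMainL] using hj1
  simp [diagSecondL, diagMainL, applyT, tF, List.getD_eq_getElem?_getD,
        List.getElem?_eq_getElem (show m.length - 1 - j < m.length by omega)]

lemma applyT_getD (g : Bool × Bool × Bool) (a : List (List Int)) (p q : Nat)
    (hp : p < a.length) (hq : q < a.length) :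
    ((applyT g a).getD p []).getD q 0 =
      (a.getD (tF g.2.1 a.length (if g.1 then q else p)) []).getD (tF g.2.2 a.length (if g.1 then p else q)) 0 := by
  obtain ⟨s, bi, bj⟩ := g
  simp [applyT, List.getD_eq_getElem?_getD, hp, hq]

lemma applyT_applyT (f g : Bool × Bool × Bool) (a : List (List Int)) :
    applyT f (applyT g a) = applyT (composeT g f) a := by
  obtain ⟨s, bi, bj⟩ := g
  obtain ⟨fs, fbi, fbj⟩ := f
  apply List.ext_getElem (by simp [applyT, composeT])
  intro i h1 h2
  apply List.ext_getElem (by simp_all [applyT, composeT])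
  intro j hj1 hj2
  have hi : i < a.length := by simpa [applyT, composeT] using h2
  have hj : j < a.length := by
    have := hj2; simp [applyT, composeT] at this; exact this
  have hu : (if fs = true then j else i) < a.length := by split <;> assumption
  have hv : (if fs = true then i else j) < a.length := by split <;> assumption
  have hlen : (applyT (s, bi, bj) a).length = a.length := by simp [applyT]
  have outer := applyT_getD (fs, fbi, fbj) (applyT (s, bi, bj) a) i j
      (by rw [hlen]; exact hi) (by rw [hlen]; exact hj)
  rw [hlen] at outer
  have inner := applyT_getD (s, bi, bj) a (tF fbi a.length (if fs = true then j else i))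
      (tF fbj a.length (if fs = true then i else j)) (tF_lt _ _ _ hu) (tF_lt _ _ _ hv)
  have rhs := applyT_getD (composeT (s, bi, bj) (fs, fbi, fbj)) a i j hi hj
  have master : ((applyT (fs, fbi, fbj) (applyT (s, bi, bj) a)).getD i []).getD j 0 =
      ((applyT (composeT (s, bi, bj) (fs, fbi, fbj)) a).getD i []).getD j 0 := by
    rw [outer, inner, rhs]
    cases s <;> cases fs <;>
      simp [composeT, tF_tF _ _ _ _ hi, tF_tF _ _ _ _ hj]
  simpa [List.getD_eq_getElem, h1, hj1, h2, hj2] using master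

lemma stepA_interp (st : Option (Bool × Bool × Bool)) (a : List (List Int)) (q : Int) :
    stepA (interpT st a) q = interpT (stepB st q) a := by
  unfold stepA stepB updT
  split_ifs <;> cases st <;>
    simp [interpT, rotateL_applyT, diagMainL_applyT, diagSecondL_applyT, applyT_applyT]

lemma foldl_interp (qs : List Int) : ∀ (st : Option (Bool × Bool × Bool)) (a : List (List Int)),
    qs.foldl stepA (interpT st a) = interpT (qs.foldl stepB st) a := by
  induction qs with
  | nil => intro st a; rfl
  | cons q qs ih =>
    intro st a
    simp only [List.foldl_cons, stepA_interp st a q, ih]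

-- the three bridging row shapes
lemma take_eq_map_range (l : List Int) (n : Nat) (h : n ≤ l.length) :
    l.take n = (List.range n).map (fun j => l.getD j 0) := by
  apply List.ext_getElem (by simp; omega)
  intro j hj1 hj2
  have hjn : j < n := by simpa using hj2
  simp [List.getElem?_eq_getElem (show j < l.length by omega)]

lemma reverse_map_range (n : Nat) (f : Nat → Int) :
    ((List.range n).map f).reverse = (List.range n).map (fun j => f (n - 1 - j)) := by
  apply List.ext_getElem (by simp)
  intro j hj1 hj2
  have hjn : j < n := by simpa using hj2
  have h1n : n - 1 - j < n := by omega
  simp [List.getElem_reverse, Nat.sub_sub]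

lemma map_eq_map_range (a : List (List Int)) (f : List Int → Int) :
    a.map f = (List.range a.length).map (fun k => f (a.getD k [])) := by
  apply List.ext_getElem (by simp)
  intro k hk1 hk2
  have hkn : k < a.length := by simpa using hk1
  simp [List.getElem?_eq_getElem hkn]

lemma min?_ge (a : List (List Int)) (n : Nat) (ha : a ≠ []) (h : ∀ row ∈ a, n ≤ row.length) :
    n ≤ (a.map List.length).min?.getD 0 := by
  cases e : (a.map List.length).min? with
  | none =>
    rw [List.min?_eq_none_iff, List.map_eq_nil_iff] at e
    exact absurd e ha
  | some m =>
    have hmem := (List.min?_eq_some_iff.mp e).1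
    obtain ⟨row, hr, hrl⟩ := List.mem_map.mp hmem
    have := h row hr
    simp only [Option.getD_some]
    omega

lemma zipStar_getD (a : List (List Int)) (c : Nat) (h : ∀ row ∈ a, a.length ≤ row.length)
    (hc : c < a.length) :
    (zipStar a).getD c [] = a.map (fun row => row.getD c 0) := by
  have ha : a ≠ [] := by intro e; subst e; simp at hc
  have hmin : a.length ≤ (a.map List.length).min?.getD 0 := min?_ge a a.length ha h
  have hc' : c < (a.map List.length).min?.getD 0 := by omega
  simp [zipStar, List.getD_eq_getElem?_getD, hc']

lemma buildFast_eq_applyT (g : Bool × Bool × Bool) (a : List (List Int))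
    (h : ∀ row ∈ a, a.length ≤ row.length) :
    buildFast g a = applyT g a := by
  obtain ⟨s, bi, bj⟩ := g
  have hrow : ∀ p, p < a.length → a.length ≤ (a.getD p []).length := by
    intro p hp
    rw [List.getD_eq_getElem _ _ hp]
    exact h _ (a.getElem_mem hp)
  cases s with
  | false =>
    apply List.ext_getElem (by simp [buildFast, applyT])
    intro i h1 h2
    have hi : i < a.length := by simpa [buildFast] using h1
    have hp : tF bi a.length i < a.length := tF_lt _ _ _ hi
    simp only [buildFast, applyT, Bool.false_eq_true, if_false, List.getElem_map, List.getElem_range]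
    rw [take_eq_map_range _ _ (hrow _ hp)]
    cases bj <;> simp [reverse_map_range, tF]
  | true =>
    apply List.ext_getElem (by simp [buildFast, applyT])
    intro i h1 h2
    have hi : i < a.length := by simpa [buildFast] using h1
    have hc : tF bj a.length i < a.length := tF_lt _ _ _ hi
    simp only [buildFast, applyT, if_true, List.getElem_map, List.getElem_range]
    rw [zipStar_getD a _ h hc, map_eq_map_range]
    cases bi <;> simp [reverse_map_range, tF]

lemma foldB_skip (qs : List Int) (st : Option (Bool × Bool × Bool))
    (h : ∀ q ∈ qs, q ≠ 0 ∧ q ≠ 1 ∧ q ≠ 2) : qs.foldl stepB st = st := by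
  induction qs generalizing st with
  | nil => rfl
  | cons q qs ih =>
    have hq := h q (by simp)
    simp only [List.foldl_cons]
    rw [show stepB st q = st by simp [stepB, hq.1, hq.2.1, hq.2.2]]
    exact ih st (fun x hx => h x (by simp [hx]))

lemma foldA_skip (qs : List Int) (a : List (List Int))
    (h : ∀ q ∈ qs, q ≠ 0 ∧ q ≠ 1 ∧ q ≠ 2) : qs.foldl stepA a = a := by
  induction qs generalizing a with
  | nil => rfl
  | cons q qs ih =>
    have hq := h q (by simp)
    simp only [List.foldl_cons]
    rw [show stepA a q = a by simp [stepA, hq.1, hq.2.1, hq.2.2]]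
    exact ih a (fun x hx => h x (by simp [hx]))

-- ===== VERDICT (by name: the statement is the Claim_ definition above) =====
theorem solution_spec : Claim_equal_solution := by
  unfold Claim_equal_solution Spec_solution
  intro a qs _ hpre
  rw [solution_eq, solution_alt_eq]
  rcases hpre with h | h
  · rw [foldB_skip qs none h, foldA_skip qs a h]; rfl
  · rw [show qs.foldl stepA a = interpT (qs.foldl stepB none) a from foldl_interp qs none a]
    cases qs.foldl stepB none with
    | none => rfl
    | some g => exact (buildFast_eq_applyT g a h).symm
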